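-- pv_equiv track=rewrite | github.com/safarinexus/uniHelsinki-spring2025-dsa | week-3/dividend.py | find_profits
-- ===== SOURCE A (Python) =====
-- def find_profits(prices):
--     res = [0 for _ in prices]
--     ptr = 0
--
--     for i in range(1, len(prices)):
--         curr = prices[i] - prices[ptr] + i - ptr
--         res[i] = max(curr, 0)
--
--         if prices[i] < prices[ptr]:
--             if i - ptr < prices[ptr] - prices[i]:
--                 ptr = i
--
--     return res
-- ===== SOURCE B (Python) =====
-- def solve(vs):
--     # returns (results, minimum) for the sublist vs, where results[j] =
--     # max(0, vs[j] - min(vs[0..j-1])) and results[0] = 0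
--     if not vs:
--         return [], 0
--     if len(vs) == 1:
--         return [0], vs[0]
--     k = len(vs) // 2
--     rl, ml = solve(vs[:k])
--     rr, mr = solve(vs[k:])
--     return rl + [max(r, v - ml) for r, v in zip(rr, vs[k:])], min(ml, mr)
--
--
-- def find_profits(prices):
--     vals = [p + i for i, p in enumerate(prices)]
--     return solve(vals)[0]
-- ===== Notes on version B (the rewrite author's own statement) =====
-- stated objective: alternative
-- what changed: A's single fused scan with a chased pointer index is replaced by a divide-and-conquer: transform to val=[p+i], recursively solve each half returning (answers, minimum), and merge by lifting the right half's answers with the left half's minimum.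
import Mathlib
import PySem

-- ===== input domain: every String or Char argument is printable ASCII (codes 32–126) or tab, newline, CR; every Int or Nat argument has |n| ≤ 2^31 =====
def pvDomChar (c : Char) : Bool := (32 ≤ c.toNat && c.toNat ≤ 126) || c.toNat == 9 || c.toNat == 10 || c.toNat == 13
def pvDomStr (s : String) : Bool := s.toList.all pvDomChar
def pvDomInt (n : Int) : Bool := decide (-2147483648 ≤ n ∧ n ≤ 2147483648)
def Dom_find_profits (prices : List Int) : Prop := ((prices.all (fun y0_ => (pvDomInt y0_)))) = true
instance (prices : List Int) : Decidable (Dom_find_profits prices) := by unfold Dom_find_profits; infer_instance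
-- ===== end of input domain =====

-- B replaces A's fused pointer-chasing scan by a divide-and-conquer on the transformed list val=[p+i] (alternative algorithm, O(n log n)).

-- ===== PORT A =====
-- loop body of A's 'for i in range(1, len(prices))', named so the proofs can refer to it
def find_profits_step (prices : List Int) (st : List Int × Int) (i : Int) : List Int × Int :=
  let curr := PySem.List.pyGetD prices i 0 - PySem.List.pyGetD prices st.2 0 + i - st.2
  let res' := PySem.List.pySetD st.1 i (max curr 0)
  let ptr' :=
    if PySem.List.pyGetD prices i 0 < PySem.List.pyGetD prices st.2 0 then
      if i - st.2 < PySem.List.pyGetD prices st.2 0 - PySem.List.pyGetD prices i 0 then i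
      else st.2
    else st.2
  (res', ptr')

def find_profits (prices : List Int) : List Int :=
  ((PySem.List.pyRange 1 (prices.length : Int) 1).foldl (find_profits_step prices)
    (prices.map (fun _ => (0 : Int)), 0)).1

-- ===== PORT B =====
-- Source B's solve: divide and conquer; the '[] => ([], 0)' branch is Python's 'if not vs' base case
def pvSolve (vs : List Int) : List Int × Int :=
  match vs with
  | [] => ([], 0)
  | [x] => ([0], x)
  | x :: y :: rest =>
    let vs' := x :: y :: rest
    let k := vs'.length / 2
    let L := pvSolve (vs'.take k)
    let R := pvSolve (vs'.drop k)
    (L.1 ++ (List.zip R.1 (vs'.drop k)).map (fun q => max q.1 (q.2 - L.2)), min L.2 R.2)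
termination_by vs.length
decreasing_by
  · simp; omega
  · simp; omega

def find_profits_alt (prices : List Int) : List Int :=
  (pvSolve ((PySem.List.enumerate prices 0).map (fun q => q.2 + q.1))).1

-- ===== PRECONDITION & SPEC =====
def Spec_find_profits (prices : List Int) (out : List Int) : Prop := out = find_profits_alt prices
instance (prices : List Int) (out : List Int) : Decidable (Spec_find_profits prices out) := by unfold Spec_find_profits; infer_instance

-- ===== CLAIM =====
def Claim_equal_find_profits : Prop := ∀ (prices : List Int), Dom_find_profits prices → Spec_find_profits prices (find_profits prices)

-- ===== LEMMAS AND PROOFS =====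

-- the common generator both proofs reduce to: element i gets max(val_i - min_so_far, 0)
def pvGo (m : Int) : List Int → List Int
  | [] => []
  | x :: xs => max (x - m) 0 :: pvGo (min m x) xs

lemma pvGo_append (l r : List Int) (m : Int) :
    pvGo m (l ++ r) = pvGo m l ++ pvGo (l.foldl min m) r := by
  induction l generalizing m with
  | nil => simp [pvGo]
  | cons x xs ih => simp [pvGo, ih, min_comm]

lemma pvGo_zip (r : List Int) (a b : Int) :
    (List.zip (pvGo a r) r).map (fun q => max q.1 (q.2 - b)) = pvGo (min a b) r := by
  induction r generalizing a b with
  | nil => simp [pvGo]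
  | cons v vs ih =>
      simp only [pvGo, List.zip_cons_cons, List.map_cons, ih]
      refine List.cons_eq_cons.mpr ⟨by omega, by rw [min_right_comm]⟩

lemma pvGo_head (m v : Int) (t : List Int) :
    pvGo (min m v) (v :: t) = pvGo m (v :: t) := by
  simp only [pvGo]
  refine List.cons_eq_cons.mpr ⟨by omega, by rw [min_assoc, min_self]⟩

lemma pvMfold (t : List Int) (a b : Int) :
    List.foldl min (min a b) t = min a (List.foldl min b t) := by
  induction t generalizing b with
  | nil => simp
  | cons c cs ih => simp only [List.foldl_cons, min_assoc, ih]

lemma pvSolve_eq (n : Nat) : ∀ (x : Int) (xs : List Int), xs.length < n →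
    pvSolve (x :: xs) = (pvGo x (x :: xs), List.foldl min x (x :: xs)) := by
  induction n using Nat.strong_induction_on with
  | _ n ih =>
    intro x xs hlen
    match xs with
    | [] => simp [pvSolve, pvGo]
    | y :: rest =>
      rw [pvSolve]
      have hlen' : rest.length + 1 < n := by simpa using hlen
      set vs := x :: y :: rest with hvs
      have hlen2 : vs.length = rest.length + 2 := by simp [hvs]
      set k := vs.length / 2 with hk
      have hk2 : k = rest.length / 2 + 1 := by rw [hk, hlen2]; omega
      obtain ⟨k', hk'⟩ : ∃ k', k = k' + 1 := ⟨rest.length / 2, hk2⟩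
      have hl : vs.take k = x :: (y :: rest).take k' := by
        rw [hvs, hk', List.take_succ_cons]
      have hrlen : (vs.drop k).length = rest.length + 2 - k := by simp [hlen2]
      have hrne : vs.drop k ≠ [] := by
        intro h
        rw [h] at hrlen
        simp at hrlen; omega
      obtain ⟨c, ds, hr⟩ := List.exists_cons_of_ne_nil hrne
      have hdslen : ds.length + 1 = rest.length + 2 - k := by
        rw [hr] at hrlen; simpa using hrlen
      have hL := ih (n - 1) (by omega) x ((y :: rest).take k') (by simp; omega)
      have hR := ih (n - 1) (by omega) c ds (by omega)
      rw [hl, hr, hL, hR]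
      set lt := (y :: rest).take k' with hlt
      have hsplit : vs = x :: lt ++ c :: ds := by
        rw [← hl, ← hr, List.take_append_drop]
      simp only [Prod.mk.injEq]
      constructor
      · -- results component
        rw [pvGo_zip, min_comm c, pvGo_head, hsplit, pvGo_append]
      · -- minimum component
        rw [hsplit]
        simp only [List.foldl_append, List.foldl_cons, min_self]
        rw [pvMfold]

-- ======= A-side loop invariant (same as a running-min characterisation) =======
lemma pvSetAppend (as bs : List Int) (b v : Int) :
    (as ++ b :: bs).set as.length v = as ++ v :: bs := by
  induction as with
  | nil => simp
  | cons a as ih => simp [ih]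

lemma pvA_loop (prices : List Int) (k : Nat) (hkn : k ≤ prices.length)
    (done : List Int) (ptr m : Int)
    (hd : done.length = k) (hptr0 : 0 ≤ ptr) (hptrk : ptr < (k : Int))
    (hm : PySem.List.pyGetD prices ptr 0 + ptr = m) :
    ((PySem.List.pyRange (k : Int) (prices.length : Int) 1).foldl (find_profits_step prices)
      (done ++ List.replicate (prices.length - k) 0, ptr)).1
    = done ++ pvGo m ((PySem.List.enumerate (prices.drop k) (k : Int)).map (fun q => q.2 + q.1)) := by
  induction hfuel : prices.length - k generalizing k done ptr m with
  | zero =>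
      have hk : k = prices.length := by omega
      subst hk
      simp [PySem.List.pyRange_one_eq_nil (le_refl (prices.length : Int)), pvGo]
  | succ fuel ih =>
      have hklt : k < prices.length := by omega
      have hcons : prices.drop k = prices[k] :: prices.drop (k + 1) :=
        List.drop_eq_getElem_cons hklt
      have hPk : PySem.List.pyGetD prices (k : Int) 0 = prices[k] := by
        simp [PySem.List.pyGetD_natCast, List.getElem?_eq_getElem hklt]
      rw [PySem.List.pyRange_one_cons (by exact_mod_cast hklt)]
      rw [List.foldl_cons]
      have hrep : List.replicate (prices.length - k) (0:Int)
          = 0 :: List.replicate (prices.length - (k + 1)) 0 := by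
        have h : prices.length - k = (prices.length - (k+1)) + 1 := by omega
        rw [h, List.replicate_succ]
      have hstep :
          find_profits_step prices (done ++ List.replicate (prices.length - k) 0, ptr) (k : Int)
          = ((done ++ [max (prices[k] + k - m) 0]) ++ List.replicate (prices.length - (k+1)) 0,
             if prices[k] + (k : Int) < m then (k : Int) else ptr) := by
        unfold find_profits_step
        simp only [hrep, hPk]
        refine Prod.ext ?_ ?_
        · show PySem.List.pySetD
              (done ++ (0 :: List.replicate (prices.length - (k+1)) 0)) (k : Int)
              (max (prices[k] - PySem.List.pyGetD prices ptr 0 + (k:Int) - ptr) 0)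
              = (done ++ [max (prices[k] + k - m) 0]) ++ List.replicate (prices.length - (k+1)) 0
          rw [PySem.List.pySetD_natCast]
          have hv : max (prices[k] - PySem.List.pyGetD prices ptr 0 + (k:Int) - ptr) 0
              = max (prices[k] + k - m) 0 := by
            congr 1; omega
          have hsa := pvSetAppend done (List.replicate (prices.length - (k+1)) 0) 0
            (max (prices[k] + k - m) 0)
          rw [hd] at hsa
          rw [hv, hsa]
          simp
        · show (if prices[k] < PySem.List.pyGetD prices ptr 0 then
              if (k:Int) - ptr < PySem.List.pyGetD prices ptr 0 - prices[k] then (k:Int) else ptr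
            else ptr) = if prices[k] + (k : Int) < m then (k : Int) else ptr
          by_cases hc : prices[k] + (k : Int) < m
          · have h1 : prices[k] < PySem.List.pyGetD prices ptr 0 := by omega
            have h2 : (k : Int) - ptr < PySem.List.pyGetD prices ptr 0 - prices[k] := by omega
            simp [h1, h2, hc]
          · have h2 : ¬ ((k : Int) - ptr < PySem.List.pyGetD prices ptr 0 - prices[k]) := by omega
            simp [h2, hc]
      rw [hfuel, show prices.length - (k + 1) = fuel from by omega] at hstep
      rw [hstep]
      have hcast : ((k : Int) + 1) = ((k + 1 : Nat) : Int) := by push_cast; ring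
      by_cases hc : prices[k] + (k : Int) < m
      · have hmin : min m (prices[k] + (k : Int)) = prices[k] + (k : Int) :=
          min_eq_right (le_of_lt hc)
        have hrec := ih (k + 1) (by omega) (done ++ [max (prices[k] + k - m) 0])
          (k : Int) (prices[k] + (k : Int)) (by simp [hd]) (Int.natCast_nonneg k)
          (by push_cast; omega) (by rw [hPk]) (by omega)
        simp only [if_pos hc]
        rw [hcast, hrec, hcons, PySem.List.enumerate_cons, List.map_cons]
        simp only [pvGo, hmin]
        rw [hcast]
        simp
      · have hmin : min m (prices[k] + (k : Int)) = m := by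
          apply min_eq_left; omega
        have hrec := ih (k + 1) (by omega) (done ++ [max (prices[k] + k - m) 0])
          ptr m (by simp [hd]) hptr0 (by push_cast; omega) hm (by omega)
        simp only [if_neg hc]
        rw [hcast, hrec, hcons, PySem.List.enumerate_cons, List.map_cons]
        simp only [pvGo, hmin]
        rw [hcast]
        simp

-- ===== VERDICT =====
theorem find_profits_spec : Claim_equal_find_profits := by
  intro prices _
  unfold Spec_find_profits
  cases prices with
  | nil =>
      simp [find_profits, find_profits_alt, pvSolve,
        PySem.List.pyRange_one_eq_nil (by norm_num : (0:Int) ≤ 1)]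
  | cons p ps =>
      have hA := pvA_loop (p :: ps) 1 (by simp) [0] 0 p (by simp) le_rfl (by norm_num)
        (by simp [PySem.List.pyGetD_zero_cons])
      simp only [List.drop_succ_cons, List.drop_zero] at hA
      have hmap : (p :: ps).map (fun _ => (0:Int)) = [0] ++ List.replicate ((p::ps).length - 1) 0 := by
        simp [List.map_const']
      have hB : find_profits_alt (p :: ps)
          = 0 :: pvGo p ((PySem.List.enumerate ps 1).map (fun q => q.2 + q.1)) := by
        rw [find_profits_alt, PySem.List.enumerate_cons, List.map_cons]
        rw [pvSolve_eq (((PySem.List.enumerate ps (0+1)).map (fun q => q.2 + q.1)).length + 1)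
          _ _ (by omega)]
        simp [pvGo]
      rw [find_profits, hmap, hB]
      simpa using hA
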